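-- pv_equiv track=rewrite | github.com/PaderinaViola/interview_practice | codesignal/trav_sum_4.py | f
-- ===== SOURCE A (Python) =====
-- def f(n):
--     prev = None
--     count = 0
--     while n > 0:
--         curr = n % 10
--         n //= 10
--         if curr != prev:
--             count += 1
--         prev = curr
--     return count
-- ===== SOURCE B (Python) =====
-- def f(n):
--     if n <= 0:
--         return 0
--     s = str(n)
--     return 1 + sum(x != y for x, y in zip(s, s[1:]))
-- ===== Notes on version B (the rewrite author's own statement) =====
-- stated objective: idiomatic
-- what changed: Replaces the divmod digit-extraction loop with prev-tracking by converting n to its decimal string once and counting adjacent unequal character pairs with zip (run count is orientation-independent).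
import Mathlib
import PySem

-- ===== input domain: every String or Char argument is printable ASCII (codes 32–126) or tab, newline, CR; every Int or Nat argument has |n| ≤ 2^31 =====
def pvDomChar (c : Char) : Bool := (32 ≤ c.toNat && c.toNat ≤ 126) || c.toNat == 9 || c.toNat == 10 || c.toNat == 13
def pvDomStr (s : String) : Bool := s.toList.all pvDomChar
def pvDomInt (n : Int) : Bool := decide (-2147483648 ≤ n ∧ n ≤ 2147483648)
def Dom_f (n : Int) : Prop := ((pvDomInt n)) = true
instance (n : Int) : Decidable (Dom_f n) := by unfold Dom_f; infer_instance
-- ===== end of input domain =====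

-- B counts digit runs on str(n) with a pairwise zip instead of A's divmod loop; return values agree everywhere.

-- ===== PORT A =====
-- the while loop of A: state (n, prev, count)
def fLoop (n : Int) (prev : Option Int) (count : Int) : Int :=
  if _h : 0 < n then
    let curr := PySem.Int.mod n 10
    fLoop (PySem.Int.floordiv n 10) (some curr)
      (if some curr ≠ prev then count + 1 else count)
  else count
termination_by n.toNat
decreasing_by
  rw [PySem.Int.floordiv_eq_ediv_of_pos (by omega)]
  omega

def f (n : Int) : Int := fLoop n none 0

-- ===== PORT B =====
def f_alt (n : Int) : Int :=
  if n ≤ 0 then 0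
  else
    let s := (PySem.Int.toStr n).toList
    1 + ((s.zip s.tail).map (fun p => if p.1 ≠ p.2 then (1 : Int) else 0)).sum

-- ===== PRECONDITION & SPEC =====
def Spec_f (n : Int) (out : Int) : Prop := out = f_alt n
instance (n : Int) (out : Int) : Decidable (Spec_f n out) := by unfold Spec_f; infer_instance

-- ===== CLAIM (what is proved, stated in full; the proofs are below) =====
def Claim_equal_f : Prop := ∀ (n : Int), Dom_f n → Spec_f n (f n)

-- ===== LEMMAS AND PROOFS =====

-- decimal digit characters of m, most significant first (what Nat.toDigits 10 computes)
def dchars (m : Nat) : List Char :=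
  if h : m < 10 then [Nat.digitChar m]
  else dchars (m / 10) ++ [Nat.digitChar (m % 10)]
termination_by m
decreasing_by omega

theorem dchars_lt {m : Nat} (h : m < 10) : dchars m = [Nat.digitChar m] := by
  rw [dchars, dif_pos h]

theorem dchars_ge {m : Nat} (h : ¬ m < 10) :
    dchars m = dchars (m / 10) ++ [Nat.digitChar (m % 10)] := by
  rw [dchars, dif_neg h]

-- decimal digits of m as Ints, least significant first (the order A's loop visits)
def digitsLSB (m : Nat) : List Int :=
  if h : m = 0 then []
  else ((m % 10 : Nat) : Int) :: digitsLSB (m / 10)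
termination_by m
decreasing_by omega

theorem digitsLSB_zero : digitsLSB 0 = [] := by rw [digitsLSB]; simp

theorem digitsLSB_pos {m : Nat} (h : m ≠ 0) :
    digitsLSB m = ((m % 10 : Nat) : Int) :: digitsLSB (m / 10) := by
  rw [digitsLSB, dif_neg h]

-- transitions counted left-to-right with a previous value (the shape of A's loop body)
def transC {α : Type} [DecidableEq α] : List α → Option α → Int
  | [], _ => 0
  | a :: t, prev => (if some a ≠ prev then 1 else 0) + transC t (some a)

-- number of maximal runs of equal adjacent elements
def runs {α : Type} [DecidableEq α] : List α → Int
  | [] => 0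
  | [_] => 1
  | a :: b :: t => (if a = b then 0 else 1) + runs (b :: t)

theorem fLoop_eq (m : Nat) : ∀ (prev : Option Int) (count : Int),
    fLoop (m : Int) prev count = count + transC (digitsLSB m) prev := by
  induction m using Nat.strong_induction_on with
  | _ m ih =>
    intro prev count
    rw [fLoop]
    by_cases hm : m = 0
    · subst hm; simp [digitsLSB_zero, transC]
    · have hpos : (0 : Int) < (m : Int) := by exact_mod_cast Nat.pos_of_ne_zero hm
      rw [dif_pos hpos]
      have hmod : PySem.Int.mod (m : Int) 10 = ((m % 10 : Nat) : Int) := by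
        exact_mod_cast PySem.Int.mod_natCast m 10
      have hdiv : PySem.Int.floordiv (m : Int) 10 = ((m / 10 : Nat) : Int) := by
        exact_mod_cast PySem.Int.floordiv_natCast m 10
      rw [hmod, hdiv, ih (m / 10) (by omega), digitsLSB_pos hm]
      simp only [transC]
      split_ifs <;> omega

theorem transC_some_eq (α : Type) [DecidableEq α] (t : List α) : ∀ (a : α),
    transC t (some a) = runs (a :: t) - 1 := by
  induction t with
  | nil => intro a; simp [transC, runs]
  | cons b t ih =>
    intro a
    simp only [transC, ih b, runs]
    by_cases h : a = b
    · simp [h]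
    · have hb : b ≠ a := Ne.symm h
      simp only [ne_eq, Option.some.injEq, hb, not_false_eq_true, if_pos, if_neg h]
      omega

theorem transC_none_eq (α : Type) [DecidableEq α] (l : List α) :
    transC l none = runs l := by
  cases l with
  | nil => simp [transC, runs]
  | cons a t =>
    simp only [transC, ne_eq, reduceCtorEq, not_false_eq_true, if_pos, transC_some_eq α t a]
    omega

theorem runs_append_singleton (α : Type) [DecidableEq α] (l : List α) (c : α) :
    runs (l ++ [c]) = runs l + (if l.getLast? = some c then 0 else 1) := by
  induction l with
  | nil => simp [runs]
  | cons a t ih =>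
    cases t with
    | nil =>
      simp only [List.cons_append, List.nil_append, runs, List.getLast?_singleton,
        Option.some.injEq]
      by_cases h : a = c <;> simp [h]
    | cons b t' =>
      simp only [List.cons_append, runs] at ih ⊢
      rw [ih]
      have : (a :: b :: t').getLast? = (b :: t').getLast? := by simp
      rw [this]
      omega

theorem runs_reverse (α : Type) [DecidableEq α] (l : List α) :
    runs l.reverse = runs l := by
  induction l with
  | nil => rfl
  | cons a t ih =>
    rw [List.reverse_cons, runs_append_singleton α t.reverse a, ih]
    rw [List.getLast?_reverse]
    cases t with
    | nil => simp [runs]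
    | cons b t' =>
      simp only [List.head?_cons, Option.some.injEq, runs]
      by_cases h : a = b
      · simp [h]
      · have hb : ¬ b = a := Ne.symm h
        simp only [if_neg h, if_neg hb]
        omega

theorem runs_map_inj {α β : Type} [DecidableEq α] [DecidableEq β] (g : α → β) (l : List α)
    (hinj : ∀ a ∈ l, ∀ b ∈ l, (g a = g b ↔ a = b)) : runs (l.map g) = runs l := by
  induction l with
  | nil => rfl
  | cons a t ih =>
    cases t with
    | nil => rfl
    | cons b t' =>
      simp only [List.map_cons, runs]
      rw [show (g b :: t'.map g) = (b :: t').map g from rfl,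
        ih (fun x hx y hy => hinj x (List.mem_cons_of_mem a hx) y (List.mem_cons_of_mem a hy))]
      have hab := hinj a (by simp) b (by simp)
      by_cases h : a = b
      · simp [h]
      · simp [h, hab.not]

theorem digitsLSB_mem (m : Nat) : ∀ d ∈ digitsLSB m, 0 ≤ d ∧ d < 10 := by
  induction m using Nat.strong_induction_on with
  | _ m ih =>
    intro d hd
    by_cases hm : m = 0
    · rw [hm, digitsLSB_zero] at hd; simp at hd
    · rw [digitsLSB_pos hm] at hd
      rcases List.mem_cons.mp hd with h | h
      · subst h
        refine ⟨by positivity, ?_⟩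
        exact_mod_cast Nat.mod_lt m (by omega)
      · exact ih (m / 10) (by omega) d h

theorem digitChar_inj (d e : Int) (hd : 0 ≤ d ∧ d < 10) (he : 0 ≤ e ∧ e < 10) :
    (Nat.digitChar d.toNat = Nat.digitChar e.toNat ↔ d = e) := by
  obtain ⟨hd0, hd1⟩ := hd
  obtain ⟨he0, he1⟩ := he
  interval_cases d <;> interval_cases e <;> simp [Nat.digitChar] <;> decide

theorem dchars_eq (m : Nat) (hm : 0 < m) :
    dchars m = (digitsLSB m).reverse.map (fun d => Nat.digitChar d.toNat) := by
  induction m using Nat.strong_induction_on with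
  | _ m ih =>
    rw [digitsLSB_pos (by omega)]
    by_cases h : m < 10
    · have h0 : m / 10 = 0 := Nat.div_eq_of_lt h
      rw [dchars_lt h, h0, digitsLSB_zero]
      simp [Nat.mod_eq_of_lt h]
    · rw [dchars_ge h, ih (m / 10) (by omega) (by omega)]
      simp
      congr 1

theorem toDigitsCore_eq (fuel : Nat) : ∀ (m : Nat) (ds : List Char), m < fuel →
    Nat.toDigitsCore 10 fuel m ds = dchars m ++ ds := by
  induction fuel with
  | zero => intro m ds h; omega
  | succ fuel ih =>
    intro m ds h
    rw [Nat.toDigitsCore]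
    by_cases h10 : m < 10
    · have h0 : m / 10 = 0 := Nat.div_eq_of_lt h10
      simp only [h0, if_pos rfl]
      rw [dchars_lt h10, Nat.mod_eq_of_lt h10]
      rfl
    · have hne : m / 10 ≠ 0 := by omega
      simp only [if_neg hne]
      rw [ih (m / 10) _ (by omega), dchars_ge h10]
      simp

theorem toDigits_eq (m : Nat) : Nat.toDigits 10 m = dchars m := by
  rw [Nat.toDigits, toDigitsCore_eq (m + 1) m [] (by omega)]
  simp

-- the pairwise zip sum of B equals runs - 1 on a nonempty list
theorem zip_sum_eq_runs (cs : List Char) (h : cs ≠ []) :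
    1 + ((cs.zip cs.tail).map (fun p => if p.1 ≠ p.2 then (1 : Int) else 0)).sum = runs cs := by
  induction cs with
  | nil => exact absurd rfl h
  | cons a t ih =>
    cases t with
    | nil => simp [runs]
    | cons b t' =>
      have hih := ih (by simp)
      simp only [List.tail_cons, List.zip_cons_cons, List.map_cons, List.sum_cons, ne_eq] at hih ⊢
      rw [runs]
      by_cases hab : a = b
      · simp only [hab, not_true_eq_false, ite_false]
        rw [if_pos trivial]
        omega
      · simp only [hab, not_false_eq_true, ite_true]
        rw [if_neg not_false]
        omega

-- ===== VERDICT (by name: the statement is the Claim_ definition above) =====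
theorem f_spec : Claim_equal_f := by
  intro n _
  unfold Spec_f f f_alt
  by_cases hn : n ≤ 0
  · rw [fLoop, dif_neg (by omega), if_pos hn]
  · rw [if_neg hn]
    push Not at hn
    obtain ⟨m, rfl⟩ : ∃ m : Nat, n = (m : Int) := ⟨n.toNat, by omega⟩
    have hm : 0 < m := by exact_mod_cast hn
    rw [fLoop_eq m none 0, transC_none_eq]
    have htl : (PySem.Int.toStr (m : Int)).toList = dchars m := by
      rw [PySem.Int.toList_toStr, PySem.Int.toChars, if_neg (by omega)]
      simp [toDigits_eq]
    have hne : dchars m ≠ [] := by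
      rw [dchars_eq m hm, digitsLSB_pos (by omega)]
      simp
    rw [htl, zip_sum_eq_runs _ hne, dchars_eq m hm,
      runs_map_inj _ _ (fun a ha b hb =>
        digitChar_inj a b (digitsLSB_mem m a (List.mem_reverse.mp ha))
          (digitsLSB_mem m b (List.mem_reverse.mp hb))),
      runs_reverse]
    omega
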